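-- pv_equiv track=rewrite | github.com/nguyennguyen0110/demo-route-optimization | app.py | _inline_list
-- ===== SOURCE A (Python) =====
-- def _inline_list(string):
--     """
--     From json string turn all the last level lists into one line.
--     :param string: string with json format
--     :return: string with inline list.
--     """
--     res = ''
--     last_index = 0
--     start = -1
--     for i in range(len(string)):
--         if string[i] == '[':
--             start = i
--         if string[i] == ']' and start >= last_index:
--             inline = [line.strip() for line in string[start:i].split('\n')]
--             for j in range(1, len(inline) - 2):
--                 inline[j] += ' '
--             res += string[last_index:start] + ''.join(inline)
--             last_index = i
--     res += string[last_index:]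
--     return res
-- ===== SOURCE B (Python) =====
-- import re
--
-- def _inline_list(string):
--     """
--     From json string turn all the last level lists into one line.
--     :param string: string with json format
--     :return: string with inline list.
--     """
--     def collapse(m):
--         lines = [line.strip() for line in m.group()[:-1].split('\n')]
--         for j in range(1, len(lines) - 2):
--             lines[j] += ' '
--         return ''.join(lines) + ']'
--     return re.sub(r'\[[^\[\]]*\]', collapse, string)
-- ===== Notes on version B (the rewrite author's own statement) =====
-- stated objective: idiomatic
-- what changed: Replaces the char-by-char index scan with last_index/start state bookkeeping by a single regex substitution re.sub(r'\[[^\[\]]*\]', collapse, string) whose callback collapses each innermost bracketed segment onto one line.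
import Mathlib
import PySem

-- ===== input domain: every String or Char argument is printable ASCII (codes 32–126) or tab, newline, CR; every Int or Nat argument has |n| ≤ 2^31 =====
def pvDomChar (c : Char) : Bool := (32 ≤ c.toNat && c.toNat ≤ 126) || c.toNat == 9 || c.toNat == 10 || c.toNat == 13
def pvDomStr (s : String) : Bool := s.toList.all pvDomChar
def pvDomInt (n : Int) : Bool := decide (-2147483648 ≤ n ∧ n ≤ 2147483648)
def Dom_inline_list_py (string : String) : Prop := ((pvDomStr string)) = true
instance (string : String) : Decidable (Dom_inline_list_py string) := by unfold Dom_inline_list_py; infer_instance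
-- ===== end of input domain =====

-- B replaces A's char-by-char index scan (last_index/start state bookkeeping) by a single
-- regex substitution re.sub(r'\[[^\[\]]*\]', collapse, string); same value, objective: idiomatic.

-- ===== PORT A =====
-- the line-collapsing transform shared verbatim by A's loop body and B's callback:
-- [line.strip() for line in cs.split('\n')]; for j in range(1, len(inline)-2): inline[j] += ' '; ''.join(inline)
def pvInlineLines (cs : List Char) : List Char :=
  let lines := (PySem.Chars.splitOn cs ['\n']).map PySem.Chars.strip
  let lines := (PySem.List.pyRange 1 ((lines.length : Int) - 2)).foldl
    (fun ln j => ln.modify j.toNat (· ++ [' '])) lines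
  PySem.Chars.join [] lines

-- one iteration of A's 'for i in range(len(string))' loop; acc = (res, last_index, start)
def pvStep (s : List Char) (acc : List Char × Int × Int) (i : Int) : List Char × Int × Int :=
  let res := acc.1
  let l := acc.2.1
  let st := if PySem.List.pyGet? s i = some '[' then i else acc.2.2
  if PySem.List.pyGet? s i = some ']' ∧ l ≤ st then
    (res ++ PySem.List.slice s (some l) (some st) ++ pvInlineLines (PySem.List.slice s (some st) (some i)),
     i, st)
  else (res, l, st)

def inline_list_py (string : String) : String :=
  let s := string.toList
  let fin := (PySem.List.pyRange 0 (s.length : Int)).foldl (pvStep s) ([], 0, -1)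
  String.ofList (fin.1 ++ PySem.List.slice s (some fin.2.1) none)

-- ===== PORT B =====
-- hand port of the regex work for the pattern \[[^\[\]]*\] (exact: the class [^\[\]] matches
-- any char incl. '\n', so a match runs from a '[' to the first following ']' with no bracket
-- between, and re.sub takes leftmost non-overlapping matches left to right):
-- pvGrabBody takes the chars up to the first ']'; it fails on '[' or end of input
def pvGrabBody : List Char → Option (List Char × List Char)
  | [] => none
  | c :: rest =>
    if c = ']' then some ([], rest)
    else if c = '[' then none
    else (pvGrabBody rest).map (fun br => (c :: br.1, br.2))

-- pvFindMatch finds the leftmost match: (text before the match, chars inside the brackets, rest)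
def pvFindMatch : List Char → Option (List Char × List Char × List Char)
  | [] => none
  | c :: rest =>
    if c = '[' then
      match pvGrabBody rest with
      | some (b, r) => some ([], b, r)
      | none => (pvFindMatch rest).map (fun pbr => ('[' :: pbr.1, pbr.2))
    else (pvFindMatch rest).map (fun pbr => (c :: pbr.1, pbr.2))

-- the 'collapse' callback: m.group()[:-1] is '[' ++ body; split/strip/space/join, then ']'
def pvCollapse (body : List Char) : List Char :=
  pvInlineLines ('[' :: body) ++ [']']

-- termination fact for the re.sub loop below: the remainder after a match is shorter
theorem pvGrabBody_length (cs : List Char) : ∀ b r, pvGrabBody cs = some (b, r) → r.length < cs.length := by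
  induction cs with
  | nil => intro b r h; simp [pvGrabBody] at h
  | cons c rest ih =>
    intro b r h
    simp only [pvGrabBody] at h
    by_cases h1 : c = ']'
    · rw [if_pos h1] at h
      simp only [Option.some.injEq, Prod.mk.injEq] at h
      obtain ⟨hb, hr⟩ := h
      subst hr
      simp only [List.length_cons]; omega
    · rw [if_neg h1] at h
      by_cases h2 : c = '['
      · rw [if_pos h2] at h; cases h
      · rw [if_neg h2] at h
        cases hg : pvGrabBody rest with
        | none => rw [hg] at h; cases h
        | some br =>
          obtain ⟨b', r'⟩ := br
          rw [hg] at h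
          simp only [Option.map_some, Option.some.injEq, Prod.mk.injEq] at h
          obtain ⟨hb, hr⟩ := h
          subst hr
          have := ih b' r' hg
          simp only [List.length_cons]; omega

theorem pvFindMatch_length (cs : List Char) : ∀ p b r, pvFindMatch cs = some (p, b, r) → r.length < cs.length := by
  induction cs with
  | nil => intro p b r h; simp [pvFindMatch] at h
  | cons c rest ih =>
    intro p b r h
    simp only [pvFindMatch] at h
    by_cases h1 : c = '['
    · rw [if_pos h1] at h
      cases hg : pvGrabBody rest with
      | some br =>
        obtain ⟨b', r'⟩ := br
        rw [hg] at h
        simp only [Option.some.injEq, Prod.mk.injEq] at h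
        obtain ⟨hp, hb, hr⟩ := h
        subst hr
        have := pvGrabBody_length rest b' r' hg
        simp only [List.length_cons]; omega
      | none =>
        rw [hg] at h
        cases hm : pvFindMatch rest with
        | none => rw [hm] at h; cases h
        | some pbr =>
          obtain ⟨p', b', r'⟩ := pbr
          rw [hm] at h
          simp only [Option.map_some, Option.some.injEq, Prod.mk.injEq] at h
          obtain ⟨hp, hb, hr⟩ := h
          subst hr
          have := ih p' b' r' hm
          simp only [List.length_cons]; omega
    · rw [if_neg h1] at h
      cases hm : pvFindMatch rest with
      | none => rw [hm] at h; cases h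
      | some pbr =>
        obtain ⟨p', b', r'⟩ := pbr
        rw [hm] at h
        simp only [Option.map_some, Option.some.injEq, Prod.mk.injEq] at h
        obtain ⟨hp, hb, hr⟩ := h
        subst hr
        have := ih p' b' r' hm
        simp only [List.length_cons]; omega

-- re.sub: substitute every non-overlapping leftmost match, left to right
def pvSub (cs : List Char) : List Char :=
  match h : pvFindMatch cs with
  | none => cs
  | some (p, b, r) => p ++ pvCollapse b ++ pvSub r
termination_by cs.length
decreasing_by exact pvFindMatch_length cs p b r h

def inline_list_py_alt (string : String) : String :=
  String.ofList (pvSub string.toList)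

-- ===== PRECONDITION & SPEC =====
def Spec_inline_list_py (string : String) (out : String) : Prop := out = inline_list_py_alt string
instance (string : String) (out : String) : Decidable (Spec_inline_list_py string out) := by unfold Spec_inline_list_py; infer_instance

-- ===== CLAIM (what is proved, stated in full; the proofs are below) =====
def Claim_equal_inline_list_py : Prop := ∀ (string : String), Dom_inline_list_py string → Spec_inline_list_py string (inline_list_py string)

-- ===== LEMMAS AND PROOFS =====

theorem pvPyRange_nil (a b : Int) (h : b ≤ a) : PySem.List.pyRange a b = [] :=
  List.eq_nil_iff_forall_not_mem.mpr (fun x hx => by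
    have := PySem.List.mem_pyRange_one.mp hx; omega)

theorem pvGB_other (c : Char) (rest : List Char) (h1 : ¬ c = ']') (h2 : ¬ c = '[') :
    pvGrabBody (c :: rest) = (pvGrabBody rest).map (fun br => (c :: br.1, br.2)) := by
  simp [pvGrabBody, h1, h2]

theorem pvFM_lb (rest : List Char) :
    pvFindMatch ('[' :: rest) = (match pvGrabBody rest with
      | some (b, r) => some ([], b, r)
      | none => (pvFindMatch rest).map (fun pbr => ('[' :: pbr.1, pbr.2))) := by
  simp [pvFindMatch]

theorem pvFM_other (c : Char) (rest : List Char) (h : ¬ c = '[') :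
    pvFindMatch (c :: rest) = (pvFindMatch rest).map (fun pbr => (c :: pbr.1, pbr.2)) := by
  simp [pvFindMatch, h]

theorem pvGrabBody_none_of_no_rb (cs : List Char) (h : ']' ∉ cs) : pvGrabBody cs = none := by
  induction cs with
  | nil => rfl
  | cons c rest ih =>
    simp only [List.mem_cons, not_or] at h
    by_cases hc : c = '['
    · subst hc; simp [pvGrabBody]
    · rw [pvGB_other c rest (fun hh => h.1 hh.symm) hc, ih h.2]; rfl

theorem pvGrabBody_none_mid (x y : List Char) (h : ']' ∉ x) : pvGrabBody (x ++ '[' :: y) = none := by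
  induction x with
  | nil => simp [pvGrabBody]
  | cons c x' ih =>
    simp only [List.mem_cons, not_or] at h
    by_cases hc : c = '['
    · subst hc; simp [pvGrabBody]
    · rw [List.cons_append, pvGB_other c _ (fun hh => h.1 hh.symm) hc, ih h.2]; rfl

theorem pvGrabBody_some (body rest : List Char) (h1 : '[' ∉ body) (h2 : ']' ∉ body) :
    pvGrabBody (body ++ ']' :: rest) = some (body, rest) := by
  induction body with
  | nil => simp [pvGrabBody]
  | cons c b ih =>
    simp only [List.mem_cons, not_or] at h1 h2
    rw [List.cons_append, pvGB_other c _ (fun hh => h2.1 hh.symm) (fun hh => h1.1 hh.symm),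
      ih h1.2 h2.2]
    rfl

theorem pvFindMatch_none_v (v : List Char) (hv : ']' ∉ v) : pvFindMatch v = none := by
  induction v with
  | nil => rfl
  | cons c rest ih =>
    simp only [List.mem_cons, not_or] at hv
    by_cases hc : c = '['
    · subst hc
      rw [pvFM_lb, pvGrabBody_none_of_no_rb rest hv.2, ih hv.2]
      rfl
    · rw [pvFM_other c rest hc, ih hv.2]
      rfl

theorem pvFindMatch_none (w v : List Char) (hw : '[' ∉ w) (hv : ']' ∉ v) :
    pvFindMatch (w ++ v) = none := by
  induction w with
  | nil => simpa using pvFindMatch_none_v v hv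
  | cons c w' ih =>
    simp only [List.mem_cons, not_or] at hw
    rw [List.cons_append, pvFM_other c _ (fun hh => hw.1 hh.symm), ih hw.2]
    rfl

theorem pvFindMatch_some_v (v1 body rest : List Char)
    (hv1 : ']' ∉ v1) (hb1 : '[' ∉ body) (hb2 : ']' ∉ body) :
    pvFindMatch (v1 ++ '[' :: body ++ ']' :: rest) = some (v1, body, rest) := by
  induction v1 with
  | nil =>
    simp only [List.nil_append, List.cons_append]
    rw [pvFM_lb, pvGrabBody_some body rest hb1 hb2]
  | cons c v' ih =>
    simp only [List.mem_cons, not_or] at hv1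
    have ih' := ih hv1.2
    simp only [List.cons_append] at ih' ⊢
    by_cases hc : c = '['
    · subst hc
      rw [pvFM_lb]
      simp only [List.append_assoc, List.cons_append] at ih' ⊢
      rw [pvGrabBody_none_mid v' (body ++ ']' :: rest) hv1.2, ih']
      rfl
    · rw [pvFM_other c _ hc, ih']
      rfl

theorem pvFindMatch_some (w v1 body rest : List Char)
    (hw : '[' ∉ w) (hv1 : ']' ∉ v1) (hb1 : '[' ∉ body) (hb2 : ']' ∉ body) :
    pvFindMatch (w ++ v1 ++ '[' :: body ++ ']' :: rest) = some (w ++ v1, body, rest) := by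
  induction w with
  | nil => simpa using pvFindMatch_some_v v1 body rest hv1 hb1 hb2
  | cons c w' ih =>
    simp only [List.mem_cons, not_or] at hw
    have ih' := ih hw.2
    simp only [List.cons_append] at ih' ⊢
    rw [pvFM_other c _ (fun hh => hw.1 hh.symm), ih']
    rfl

theorem pvSub_of_none (cs : List Char) (h : pvFindMatch cs = none) : pvSub cs = cs := by
  rw [pvSub.eq_def]
  split <;> simp_all

theorem pvSub_of_some (cs p b r : List Char) (h : pvFindMatch cs = some (p, b, r)) :
    pvSub cs = p ++ pvCollapse b ++ pvSub r := by
  rw [pvSub.eq_def]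
  split <;> simp_all

theorem pvSub_rb_cons (r : List Char) : pvSub (']' :: r) = ']' :: pvSub r := by
  cases hm : pvFindMatch r with
  | none =>
    rw [pvSub_of_none _ (by rw [pvFM_other ']' r (by decide), hm]; rfl), pvSub_of_none r hm]
  | some pbr =>
    obtain ⟨p, b, rr⟩ := pbr
    have h1 : pvFindMatch (']' :: r) = some (']' :: p, b, rr) := by
      rw [pvFM_other ']' r (by decide), hm]
      rfl
    rw [pvSub_of_some _ _ _ _ h1, pvSub_of_some r p b rr hm]
    simp

-- A's whole computation from loop index i onward (state acc), including the final flush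
def pvRun (s : List Char) (i : Nat) (acc : List Char × Int × Int) : List Char :=
  ((PySem.List.pyRange (i : Int) (s.length : Int)).foldl (pvStep s) acc).1 ++
    PySem.List.slice s
      (some (((PySem.List.pyRange (i : Int) (s.length : Int)).foldl (pvStep s) acc).2.1)) none

-- the loop invariant: the pending region s[l:i) is w ++ v where w has no '[' and,
-- if a '[' has been seen in it (vb = some (v1, body)), v = v1 ++ '[' :: body with no ']'
-- after that first '['; start points at the last '[' of the region, else start < last_index
theorem pvMain (s : List Char) : ∀ (u : List Char) (i l : Nat) (res w : List Char)
    (vb : Option (List Char × List Char)) (st : Int),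
    l ≤ s.length →
    s.drop l = w ++ (match vb with | none => [] | some (v1, body) => v1 ++ '[' :: body) ++ u →
    s.drop i = u →
    i = l + w.length + (match vb with | none => 0 | some (v1, body) => v1.length + 1 + body.length) →
    '[' ∉ w →
    (match vb with
     | none => st < (l : Int)
     | some (v1, body) => ']' ∉ v1 ∧ '[' ∉ body ∧ ']' ∉ body ∧ st = (l : Int) + w.length + v1.length) →
    pvRun s i (res, (l : Int), st) = res ++ pvSub (s.drop l) := by
  intro u
  induction u with
  | nil =>
    intro i l res w vb st hl h1 h2 h3 h4 h5
    have hn : s.length ≤ i := List.drop_eq_nil_iff.mp h2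
    unfold pvRun
    rw [pvPyRange_nil _ _ (by exact_mod_cast hn)]
    simp only [List.foldl_nil]
    rw [PySem.List.slice_some_none, PySem.List.clampIdx_natCast, min_eq_left hl]
    have hnone : pvFindMatch (s.drop l) = none := by
      cases vb with
      | none =>
        have hh1 : s.drop l = w ++ [] ++ [] := h1
        rw [hh1]
        simpa using pvFindMatch_none w [] h4 (by simp)
      | some vb' =>
        obtain ⟨v1, body⟩ := vb'
        obtain ⟨hv1, hb1, hb2, hst⟩ := h5
        have hh1 : s.drop l = w ++ (v1 ++ '[' :: body) ++ [] := h1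
        rw [hh1]
        have hvmem : ']' ∉ v1 ++ '[' :: body := by
          simp only [List.mem_append, List.mem_cons, not_or]
          refine ⟨hv1, ?_, hb2⟩
          decide
        simpa using pvFindMatch_none w (v1 ++ '[' :: body) h4 hvmem
    rw [pvSub_of_none _ hnone]
  | cons c u' ih =>
    intro i l res w vb st hl h1 h2 h3 h4 h5
    have hi : i < s.length := by
      have hlen := congrArg List.length h2
      simp only [List.length_drop, List.length_cons] at hlen
      omega
    have hgi : PySem.List.pyGet? s (i : Int) = some c := by
      have h0 : (s.drop i)[0]? = some c := by simp [h2]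
      rw [List.getElem?_drop] at h0
      rw [PySem.List.pyGet?_natCast]
      simpa using h0
    have hcast : ((i : Int) + 1) = ((i + 1 : Nat) : Int) := by push_cast; ring
    unfold pvRun
    rw [PySem.List.pyRange_one_cons (by exact_mod_cast hi)]
    simp only [List.foldl_cons]
    by_cases hc1 : c = '['
    · -- current char is '[' : start := i, no flush
      subst hc1
      have hstep : pvStep s (res, (l : Int), st) (i : Int) = (res, (l : Int), (i : Int)) := by
        simp [pvStep, hgi]
      rw [hstep, hcast]
      cases vb with
      | none =>
        have hh1 : s.drop l = w ++ [] ++ ('[' :: u') := h1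
        have hh3 : i = l + w.length + 0 := h3
        have ihh := ih (i + 1) l res w (some ([], [])) (i : Int) hl
          (by rw [hh1]; simp)
          (by rw [← List.tail_drop, h2]; rfl)
          (by simp; omega)
          h4
          (by refine ⟨by simp, by simp, by simp, ?_⟩; simp; omega)
        unfold pvRun at ihh
        exact ihh
      | some vb' =>
        obtain ⟨v1, body⟩ := vb'
        obtain ⟨hv1, hb1, hb2, hst⟩ := h5
        have hh1 : s.drop l = w ++ (v1 ++ '[' :: body) ++ ('[' :: u') := h1
        have hh3 : i = l + w.length + (v1.length + 1 + body.length) := h3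
        have ihh := ih (i + 1) l res w (some (v1 ++ '[' :: body, [])) (i : Int) hl
          (by rw [hh1]; simp)
          (by rw [← List.tail_drop, h2]; rfl)
          (by simp [List.length_append]; omega)
          h4
          (by
            refine ⟨?_, by simp, by simp, ?_⟩
            · simp only [List.mem_append, List.mem_cons, not_or]
              refine ⟨hv1, ?_, hb2⟩
              decide
            · simp [List.length_append]; omega)
        unfold pvRun at ihh
        exact ihh
    · by_cases hc2 : c = ']'
      · subst hc2
        cases vb with
        | none =>
          -- ']' with start < last_index : gate fails
          have h5' : st < (l : Int) := h5
          have hh1 : s.drop l = w ++ [] ++ (']' :: u') := h1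
          have hh3 : i = l + w.length + 0 := h3
          have hstep : pvStep s (res, (l : Int), st) (i : Int) = (res, (l : Int), st) := by
            simp [pvStep, hgi, not_le.mpr h5']
          rw [hstep, hcast]
          have ihh := ih (i + 1) l res (w ++ [']']) none st hl
            (by rw [hh1]; simp)
            (by rw [← List.tail_drop, h2]; rfl)
            (by simp [List.length_append]; omega)
            (by
              simp only [List.mem_append, List.mem_singleton, not_or]
              exact ⟨h4, by decide⟩)
            h5'
          unfold pvRun at ihh
          exact ihh
        | some vb' =>
          -- ']' closing the pending '[' : A flushes, B's leftmost match is exactly here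
          obtain ⟨v1, body⟩ := vb'
          obtain ⟨hv1, hb1, hb2, hst⟩ := h5
          have hh1 : s.drop l = w ++ (v1 ++ '[' :: body) ++ (']' :: u') := h1
          have hh3 : i = l + w.length + (v1.length + 1 + body.length) := h3
          have hgate : (l : Int) ≤ st := by rw [hst]; omega
          have hstep : pvStep s (res, (l : Int), st) (i : Int) =
              (res ++ PySem.List.slice s (some (l : Int)) (some st) ++
                pvInlineLines (PySem.List.slice s (some st) (some (i : Int))), (i : Int), st) := by
            simp [pvStep, hgi, hgate]
          have hdl : s.drop l = (w ++ v1) ++ ('[' :: body ++ ']' :: u') := by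
            rw [hh1]; simp
          have hdl2 : s.drop l = w ++ v1 ++ '[' :: body ++ ']' :: u' := by
            rw [hh1]; simp
          have hstc : st = ((l + w.length + v1.length : Nat) : Int) := by
            rw [hst]; omega
          have hsl1 : PySem.List.slice s (some (l : Int)) (some st) = w ++ v1 := by
            rw [hstc, PySem.List.slice_natCast]
            rw [show l + w.length + v1.length - l = (w ++ v1).length by
              simp only [List.length_append]; omega]
            rw [hdl]
            exact List.take_left' rfl
          have hdrop : s.drop (l + w.length + v1.length) = '[' :: body ++ ']' :: u' := by
            have h' : List.drop ((w ++ v1).length) (s.drop l) = '[' :: body ++ ']' :: u' := by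
              rw [hdl]; exact List.drop_left' rfl
            rw [List.drop_drop] at h'
            rw [show l + w.length + v1.length = l + (w ++ v1).length by
              simp only [List.length_append]; omega]
            exact h'
          have hsl2 : PySem.List.slice s (some st) (some (i : Int)) = '[' :: body := by
            rw [hstc, PySem.List.slice_natCast]
            rw [show i - (l + w.length + v1.length) = body.length + 1 by omega]
            rw [hdrop]
            exact List.take_left' (by simp)
          rw [hstep, hsl1, hsl2, hcast]
          have ihh := ih (i + 1) i (res ++ (w ++ v1) ++ pvInlineLines ('[' :: body)) [']'] none st
            (le_of_lt hi)
            (by rw [h2]; simp)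
            (by rw [← List.tail_drop, h2]; rfl)
            (by simp)
            (by decide)
            (by omega)
          unfold pvRun at ihh
          rw [ihh, h2, pvSub_rb_cons, hdl2,
            pvSub_of_some _ _ _ _ (pvFindMatch_some w v1 body u' h4 hv1 hb1 hb2)]
          simp [pvCollapse, List.append_assoc]
      · -- ordinary character: state unchanged
        have hstep : pvStep s (res, (l : Int), st) (i : Int) = (res, (l : Int), st) := by
          simp [pvStep, hgi, hc1, hc2]
        rw [hstep, hcast]
        cases vb with
        | none =>
          have hh1 : s.drop l = w ++ [] ++ (c :: u') := h1
          have hh3 : i = l + w.length + 0 := h3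
          have h5' : st < (l : Int) := h5
          have ihh := ih (i + 1) l res (w ++ [c]) none st hl
            (by rw [hh1]; simp)
            (by rw [← List.tail_drop, h2]; rfl)
            (by simp [List.length_append]; omega)
            (by
              simp only [List.mem_append, List.mem_singleton, not_or]
              exact ⟨h4, fun hh => hc1 hh.symm⟩)
            h5'
          unfold pvRun at ihh
          exact ihh
        | some vb' =>
          obtain ⟨v1, body⟩ := vb'
          obtain ⟨hv1, hb1, hb2, hst⟩ := h5
          have hh1 : s.drop l = w ++ (v1 ++ '[' :: body) ++ (c :: u') := h1
          have hh3 : i = l + w.length + (v1.length + 1 + body.length) := h3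
          have ihh := ih (i + 1) l res w (some (v1, body ++ [c])) st hl
            (by rw [hh1]; simp)
            (by rw [← List.tail_drop, h2]; rfl)
            (by simp [List.length_append]; omega)
            h4
            (by
              refine ⟨hv1, ?_, ?_, hst⟩
              · simp only [List.mem_append, List.mem_singleton, not_or]
                exact ⟨hb1, fun hh => hc1 hh.symm⟩
              · simp only [List.mem_append, List.mem_singleton, not_or]
                exact ⟨hb2, fun hh => hc2 hh.symm⟩)
          unfold pvRun at ihh
          exact ihh

-- ===== VERDICT (by name: the statement is the Claim_ definition above) =====
theorem inline_list_py_spec : Claim_equal_inline_list_py := by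
  intro string _
  unfold Spec_inline_list_py inline_list_py inline_list_py_alt
  have h := pvMain string.toList string.toList 0 0 [] [] none (-1)
    (by simp) (by simp) (by simp) (by simp) (by simp) (by simp)
  unfold pvRun at h
  simp only [Nat.cast_zero, List.drop_zero, List.nil_append] at h
  exact congrArg String.ofList h
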